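-- pv_equiv track=rewrite | github.com/fedegr/leetcode | python/3623-count-number-of-trapezoids-i.py | countTrapezoids
-- ===== SOURCE A (Python) =====
-- import math
-- from typing import List
--
-- def countTrapezoids(points: List[List[int]]) -> int:
--     ys = {}
--     for x, y in points:
--         ys.setdefault(y, set()).add(x)
--
--     horizontal_lines = 0
--     ys_combs = {}
--     for y, xs in ys.items():
--         if len(xs) >= 2:
--             ys_combs[y] = math.comb(len(xs), 2)
--             horizontal_lines += ys_combs[y]
--
--     count = 0
--     prev_parallel_lines = 0
--     for y, combs in ys_combs.items():
--         horizontal_lines -= combs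
--         count += (combs * horizontal_lines)
--
--     return count % (10**9 + 7)
-- ===== SOURCE B (Python) =====
-- def countTrapezoids(points):
--     ys = {}
--     for x, y in points:
--         ys.setdefault(y, set()).add(x)
--
--     total = 0
--     sum_sq = 0
--     for xs in ys.values():
--         n = len(xs)
--         c = n * (n - 1) // 2
--         total += c
--         sum_sq += c * c
--
--     return (total * total - sum_sq) // 2 % (10**9 + 7)
-- ===== Notes on version B (the rewrite author's own statement) =====
-- stated objective: simpler
-- what changed: Replaces A's two-pass aggregation (ys_combs dict plus running-subtraction pairing loop) with one pass accumulating total and sum of squares of per-level pair counts and the closed form (total^2 - sum_sq)//2.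
import Mathlib
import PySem

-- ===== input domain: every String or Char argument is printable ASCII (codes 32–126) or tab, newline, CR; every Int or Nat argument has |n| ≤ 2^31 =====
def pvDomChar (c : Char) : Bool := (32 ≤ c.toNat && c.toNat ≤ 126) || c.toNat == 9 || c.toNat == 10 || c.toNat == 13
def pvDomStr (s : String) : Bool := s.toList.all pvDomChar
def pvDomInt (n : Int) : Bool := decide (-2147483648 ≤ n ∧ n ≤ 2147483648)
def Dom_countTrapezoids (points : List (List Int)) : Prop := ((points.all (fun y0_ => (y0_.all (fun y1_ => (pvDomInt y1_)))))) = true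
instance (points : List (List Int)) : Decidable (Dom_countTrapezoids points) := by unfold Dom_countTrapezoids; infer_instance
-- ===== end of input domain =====

-- B replaces A's two-pass aggregation (ys_combs dict + running-subtraction pairing loop) with
-- one pass computing total and sum of squares of per-level pair counts and a closed form.

-- shared Python step 'ys.setdefault(y, set()).add(x)': setdefault then in-place set add,
-- i.e. store (current set, or empty) with x added, at key y (position kept).
def pvGroup (points : List (List Int)) : PySem.Dict Int (PySem.Set Int) :=
  points.foldl (fun d p =>
    match p with
    | [x, y] => d.insert y ((d.getD y PySem.Set.empty).add x)
    | _ => d) PySem.Dict.empty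

-- ===== PORT A =====
def countTrapezoids (points : List (List Int)) : Int :=
  let ys := pvGroup points
  let st := ys.items.foldl (fun (st : Int × PySem.Dict Int Int) yxs =>
      if 2 ≤ yxs.2.length then
        let c : Int := (yxs.2.length.choose 2 : Nat)   -- math.comb(len(xs), 2)
        (st.1 + c, st.2.insert yxs.1 c)
      else st) (0, PySem.Dict.empty)
  let fin := st.2.items.foldl (fun (cs : Int × Int) yc =>
      let h := cs.2 - yc.2
      (cs.1 + yc.2 * h, h)) (0, st.1)
  PySem.Int.mod fin.1 (10 ^ 9 + 7)

-- ===== PORT B =====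
def countTrapezoids_alt (points : List (List Int)) : Int :=
  let ys := pvGroup points
  let ts := ys.items.foldl (fun (ts : Int × Int) yxs =>
      let n : Int := (yxs.2.length : Int)
      let c := PySem.Int.floordiv (n * (n - 1)) 2
      (ts.1 + c, ts.2 + c * c)) (0, 0)
  PySem.Int.mod (PySem.Int.floordiv (ts.1 * ts.1 - ts.2) 2) (10 ^ 9 + 7)

-- ===== PRECONDITION & SPEC =====
-- Pre_ excludes exactly the rows on which Python's 'for x, y in points' raises (unpacking a
-- row whose length is not 2): both A and B raise ValueError there.
def Pre_countTrapezoids (points : List (List Int)) : Prop :=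
  ∀ p ∈ points, p.length = 2
instance (points : List (List Int)) : Decidable (Pre_countTrapezoids points) := by
  unfold Pre_countTrapezoids; infer_instance

def pvWitness_countTrapezoids : List (List Int) := [[0, 0], [1, 0], [0, 1], [2, 1]]

def Spec_countTrapezoids (points : List (List Int)) (out : Int) : Prop := out = countTrapezoids_alt points
instance (points : List (List Int)) (out : Int) : Decidable (Spec_countTrapezoids points out) := by unfold Spec_countTrapezoids; infer_instance

-- ===== CLAIM (what is proved, stated in full; the proofs are below) =====
def Claim_equal_countTrapezoids : Prop := ∀ (points : List (List Int)), Dom_countTrapezoids points → Pre_countTrapezoids points → Spec_countTrapezoids points (countTrapezoids points)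

-- ===== LEMMAS AND PROOFS =====

-- A's pairing loop as a recursive function of the remaining combs values
def pvPair : List Int → Int → Int
  | [], _ => 0
  | c :: cs, h => c * (h - c) + pvPair cs (h - c)

theorem pvFold2_eq (l : List (Int × Int)) (a h : Int) :
    l.foldl (fun (cs : Int × Int) yc => (cs.1 + yc.2 * (cs.2 - yc.2), cs.2 - yc.2))
        (a, h) = (a + pvPair (l.map (·.2)) h, h - (l.map (·.2)).sum) := by
  induction l generalizing a h with
  | nil => simp only [List.map_nil, List.foldl_nil, List.sum_nil, pvPair]; ring_nf
  | cons p l ih => simp only [List.foldl_cons, List.map_cons, List.sum_cons, pvPair, ih]; ring_nf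

theorem pvPair_closed (cs : List Int) (h : Int) :
    2 * pvPair cs h = 2 * cs.sum * h - cs.sum ^ 2 - (cs.map (fun c => c * c)).sum := by
  induction cs generalizing h with
  | nil => show 2 * (0 : Int) = _; simp
  | cons c cs ih =>
    simp only [pvPair, List.sum_cons, List.map_cons, List.sum_cons]
    linear_combination ih (h - c)

def pvCval (p : Int × PySem.Set Int) : Int := ((p.2.length.choose 2 : Nat) : Int)

theorem pvGroup_nodup : ∀ (points : List (List Int)) (d : PySem.Dict Int (PySem.Set Int)),
    d.keys.Nodup →
    (points.foldl (fun d p =>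
      match p with
      | [x, y] => d.insert y ((d.getD y PySem.Set.empty).add x)
      | _ => d) d).keys.Nodup := by
  intro points
  induction points with
  | nil => intro d hd; simpa using hd
  | cons p ps ih =>
    intro d hd
    rcases p with _ | ⟨x, _ | ⟨y, _ | _⟩⟩ <;>
      simp only [List.foldl_cons] <;>
      first
        | exact ih _ hd
        | exact ih _ (PySem.Dict.nodup_keys_insert _ _ _ hd)

theorem pvFold1_spec : ∀ (I : List (Int × PySem.Set Int)) (a : Int) (d0 : PySem.Dict Int Int),
    (I.map (·.1)).Nodup → (∀ p ∈ I, d0.contains p.1 = false) →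
    I.foldl (fun (st : Int × PySem.Dict Int Int) yxs =>
        if 2 ≤ yxs.2.length then
          (st.1 + ((yxs.2.length.choose 2 : Nat) : Int),
           st.2.insert yxs.1 ((yxs.2.length.choose 2 : Nat) : Int))
        else st) (a, d0)
    = (a + ((I.filter (fun p => decide (2 ≤ p.2.length))).map pvCval).sum,
       PySem.Dict.mk (d0.items ++
         (I.filter (fun p => decide (2 ≤ p.2.length))).map (fun p => (p.1, pvCval p)))) := by
  intro I
  induction I with
  | nil =>
    intro a d0 _ _
    simp only [List.foldl_nil, List.filter_nil, List.map_nil, List.sum_nil, List.append_nil,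
      add_zero]
  | cons p I ih =>
    intro a d0 hnd hfresh
    simp only [List.map_cons, List.nodup_cons] at hnd
    have hfp : d0.contains p.1 = false := hfresh p (List.mem_cons_self)
    by_cases hp : 2 ≤ p.2.length
    · have hd : decide (2 ≤ p.2.length) = true := decide_eq_true hp
      simp only [List.foldl_cons, if_pos hp, List.filter_cons, hd, if_true, List.map_cons,
        List.sum_cons]
      rw [ih (a + ((p.2.length.choose 2 : Nat) : Int)) _ hnd.2]
      · simp only [Prod.mk.injEq]
        constructor
        · simp only [pvCval]; ring
        · apply PySem.Dict.ext
          have h3 : (d0.insert p.1 ((p.2.length.choose 2 : Nat) : Int)).items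
              = d0.items ++ [(p.1, ((p.2.length.choose 2 : Nat) : Int))] :=
            PySem.Dict.items_insert_of_not_contains _ _ hfp
          simp only [h3, List.append_assoc, List.singleton_append, pvCval]
      · intro q hq
        rw [PySem.Dict.contains_insert]
        have hne : q.1 ≠ p.1 := by
          intro h
          exact hnd.1 (by simpa [h] using List.mem_map_of_mem (f := (·.1)) hq)
        simp [hne, hfresh q (List.mem_cons_of_mem _ hq)]
    · have hd : decide (2 ≤ p.2.length) = false := decide_eq_false hp
      simp only [List.foldl_cons, if_neg hp, List.filter_cons, hd, Bool.false_eq_true, if_false]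
      exact ih a d0 hnd.2 (fun q hq => hfresh q (List.mem_cons_of_mem _ hq))

theorem pvC_eq (m : Nat) :
    PySem.Int.floordiv ((m : Int) * ((m : Int) - 1)) 2 = ((m.choose 2 : Nat) : Int) := by
  have h1 : (m : Int) * ((m : Int) - 1) = ((m * (m - 1) : Nat) : Int) := by
    cases m with
    | zero => simp
    | succ k => push_cast [Nat.succ_sub_one]; ring
  rw [h1]
  rw [show ((2 : Int)) = ((2 : Nat) : Int) from rfl, PySem.Int.floordiv_natCast]
  rw [Nat.choose_two_right]

theorem pvFoldB_spec : ∀ (I : List (Int × PySem.Set Int)) (t q : Int),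
    I.foldl (fun (ts : Int × Int) yxs =>
        let n : Int := (yxs.2.length : Int)
        let c := PySem.Int.floordiv (n * (n - 1)) 2
        (ts.1 + c, ts.2 + c * c)) (t, q)
    = (t + (I.map pvCval).sum, q + (I.map (fun p => pvCval p * pvCval p)).sum) := by
  intro I
  induction I with
  | nil => intro t q; simp
  | cons p I ih =>
    intro t q
    simp only [List.foldl_cons, List.map_cons, List.sum_cons]
    rw [pvC_eq p.2.length]
    rw [ih]
    simp only [Prod.mk.injEq, pvCval]
    constructor <;> ring

theorem pvSum_filter (I : List (Int × PySem.Set Int)) (f : (Int × PySem.Set Int) → Int)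
    (pred : (Int × PySem.Set Int) → Bool)
    (h : ∀ x ∈ I, pred x = false → f x = 0) :
    ((I.filter pred).map f).sum = (I.map f).sum := by
  induction I with
  | nil => rfl
  | cons p I ih =>
    have ih' := ih (fun x hx => h x (List.mem_cons_of_mem _ hx))
    by_cases hp : pred p = true
    · simp [hp, ih']
    · have h0 : f p = 0 := h p (List.mem_cons_self) (by simpa using hp)
      simp [hp, ih', h0]

-- ===== VERDICT (by name: the statement is the Claim_ definition above) =====
theorem countTrapezoids_spec : Claim_equal_countTrapezoids := by
  intro points _ _
  show countTrapezoids points = countTrapezoids_alt points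
  unfold countTrapezoids countTrapezoids_alt
  dsimp only
  have hnd : ((pvGroup points).items.map (·.1)).Nodup :=
    pvGroup_nodup points PySem.Dict.empty (by simp)
  rw [pvFold1_spec _ 0 PySem.Dict.empty hnd (by intro q _; simp), pvFold2_eq, pvFoldB_spec]
  simp only [zero_add, show (PySem.Dict.empty : PySem.Dict Int Int).items = [] from rfl,
    List.nil_append, List.map_map]
  set I := (pvGroup points).items with hI
  set flt := I.filter (fun p => decide (2 ≤ p.2.length)) with hflt
  have hmap2 : flt.map ((fun x => x.2) ∘ (fun p => (p.1, pvCval p))) = flt.map pvCval := rfl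
  rw [hmap2]
  have hz : ∀ x ∈ I, (fun p => decide (2 ≤ p.2.length)) x = false → pvCval x = 0 := by
    intro x _ hx
    have h2 : ¬ 2 ≤ x.2.length := by simpa using hx
    unfold pvCval
    interval_cases h : x.2.length <;> simp_all
  have hT : (I.map pvCval).sum = (flt.map pvCval).sum := by
    rw [hflt, pvSum_filter I pvCval _ hz]
  have hQ : (I.map (fun p => pvCval p * pvCval p)).sum
      = ((flt.map pvCval).map (fun c => c * c)).sum := by
    rw [List.map_map, hflt,
      ← pvSum_filter I (fun p => pvCval p * pvCval p) _ (by intro x hx hfx; simp [hz x hx hfx])]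
    rfl
  rw [hT, hQ]
  have hclosed := pvPair_closed (flt.map pvCval) (flt.map pvCval).sum
  have h2 : (flt.map pvCval).sum * (flt.map pvCval).sum
        - ((flt.map pvCval).map (fun c => c * c)).sum
      = 2 * pvPair (flt.map pvCval) (flt.map pvCval).sum := by
    rw [hclosed]; ring
  rw [h2, PySem.Int.floordiv_eq_ediv_of_pos (by norm_num),
    Int.mul_ediv_cancel_left _ (by norm_num)]
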